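-- pv_equiv track=rewrite | github.com/abaire/nxdk_pgraph_tests | cmake/modules/SyncResourceDirs.py | _build_relative_paths
-- ===== SOURCE A (Python) =====
-- def _build_relative_paths(resource_roots: list[str], resource_dirs: list[str]) -> dict[str, str]:
--     ret: dict[str, str] = {}
--
--     for directory in resource_dirs:
--         longest_match = -1
--         rootless = ""
--
--         for root in resource_roots:
--             root_len = len(root)
--
--             if directory.startswith(root) and root_len > longest_match:
--                 rootless = directory[root_len + 1 :]
--                 longest_match = root_len
--
--         ret[directory] = rootless
--     return ret
-- ===== SOURCE B (Python) =====
-- def _build_relative_paths(resource_roots: list[str], resource_dirs: list[str]) -> dict[str, str]: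
--     # Index the roots in a set once; for each directory scan its own prefixes
--     # from longest to shortest and take the first one that is a root.
--     roots = set(resource_roots)
--     ret: dict[str, str] = {}
--     for directory in resource_dirs:
--         rootless = ""
--         for length in range(len(directory), -1, -1):
--             if directory[:length] in roots:
--                 rootless = directory[length + 1 :]
--                 break
--         ret[directory] = rootless
--     return ret
-- ===== Notes on version B (the rewrite author's own statement) =====
-- stated objective: faster
-- what changed: Instead of scanning every root per directory while tracking the longest match, B builds a set of the roots once and scans each directory's own prefixes from longest to shortest, returning at the first one found in the set.
import Mathlib
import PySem

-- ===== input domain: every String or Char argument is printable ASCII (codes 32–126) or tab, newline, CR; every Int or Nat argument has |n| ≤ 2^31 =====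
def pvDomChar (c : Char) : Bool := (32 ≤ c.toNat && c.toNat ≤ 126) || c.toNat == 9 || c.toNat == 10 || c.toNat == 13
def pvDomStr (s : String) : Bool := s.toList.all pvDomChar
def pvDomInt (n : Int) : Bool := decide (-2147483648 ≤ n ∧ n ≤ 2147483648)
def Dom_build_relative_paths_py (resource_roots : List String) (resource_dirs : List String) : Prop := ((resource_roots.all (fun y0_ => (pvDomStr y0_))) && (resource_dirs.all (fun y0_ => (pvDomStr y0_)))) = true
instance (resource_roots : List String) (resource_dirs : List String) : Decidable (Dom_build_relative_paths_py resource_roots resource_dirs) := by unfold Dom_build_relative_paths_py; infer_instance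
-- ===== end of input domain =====

-- B replaces A's scan of all roots per directory by a set of the roots built once
-- and a longest-first scan of each directory's own prefixes (alternative algorithm).

-- ===== PORT A =====
-- inner loop of A: state (longest_match, rootless), scanned over resource_roots
def build_relative_paths_py (resource_roots : List String) (resource_dirs : List String) : List (String × String) :=
  (resource_dirs.foldl (fun (ret : PySem.Dict String String) directory =>
    let st := resource_roots.foldl (fun (st : Int × String) root =>
      let root_len : Int := PySem.Str.len root
      if PySem.Str.startswith directory root && decide (root_len > st.1) then
        (root_len, PySem.Str.slice directory (some (root_len + 1)) none)
      else st) (-1, "")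
    ret.insert directory st.2) PySem.Dict.empty).items

-- ===== PORT B =====
-- B's inner loop: first length L (scanning len(directory) down to 0) with directory[:L] in roots
def brpFindSuffix (directory : String) (roots : PySem.Set String) : List Int → String
  | [] => ""
  | L :: rest =>
    if PySem.Set.contains roots (PySem.Str.slice directory none (some L)) then
      PySem.Str.slice directory (some (L + 1)) none
    else brpFindSuffix directory roots rest

def build_relative_paths_py_alt (resource_roots : List String) (resource_dirs : List String) : List (String × String) :=
  let roots := PySem.Set.ofList resource_roots
  (resource_dirs.foldl (fun (ret : PySem.Dict String String) directory =>
    ret.insert directory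
      (brpFindSuffix directory roots (PySem.List.pyRange (PySem.Str.len directory) (-1) (-1))))
    PySem.Dict.empty).items

-- ===== PRECONDITION & SPEC =====
def Spec_build_relative_paths_py (resource_roots : List String) (resource_dirs : List String) (out : List (String × String)) : Prop := out = build_relative_paths_py_alt resource_roots resource_dirs
instance (resource_roots : List String) (resource_dirs : List String) (out : List (String × String)) : Decidable (Spec_build_relative_paths_py resource_roots resource_dirs out) := by unfold Spec_build_relative_paths_py; infer_instance

-- ===== CLAIM (what is proved, stated in full; the proofs are below) =====
def Claim_equal_build_relative_paths_py : Prop := ∀ (resource_roots : List String) (resource_dirs : List String), Dom_build_relative_paths_py resource_roots resource_dirs → Spec_build_relative_paths_py resource_roots resource_dirs (build_relative_paths_py resource_roots resource_dirs)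

-- ===== LEMMAS AND PROOFS =====

-- A's inner loop restricted to its first component: the length of the longest root
-- that is a prefix of `directory` (or -1 when none is).
def brpBestLen (directory : String) (roots : List String) (m : Int) : Int :=
  roots.foldl (fun m root =>
    if PySem.Str.startswith directory root && decide (PySem.Str.len root > m) then
      PySem.Str.len root
    else m) m

-- the value A stores for `directory` when the longest prefix-root has length m (m = -1: none)
def brpRepr (directory : String) (m : Int) : String :=
  if 0 ≤ m then PySem.Str.slice directory (some (m + 1)) none else ""

theorem brpRepr_neg (directory : String) (m : Int) (h : m < 0) : brpRepr directory m = "" := by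
  simp [brpRepr, not_le.mpr h]

-- A's inner fold tracks (brpBestLen, brpRepr of it)
theorem brpFoldA (directory : String) (roots : List String) : ∀ (m : Int),
    roots.foldl (fun (st : Int × String) root =>
      let root_len : Int := PySem.Str.len root
      if PySem.Str.startswith directory root && decide (root_len > st.1) then
        (root_len, PySem.Str.slice directory (some (root_len + 1)) none)
      else st) (m, brpRepr directory m)
    = (brpBestLen directory roots m, brpRepr directory (brpBestLen directory roots m)) := by
  induction roots with
  | nil => intro m; simp [brpBestLen]
  | cons r rs ih =>
    intro m
    by_cases h : (PySem.Str.startswith directory r && decide (PySem.Str.len r > m)) = true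
    · have hrepr : PySem.Str.slice directory (some (PySem.Str.len r + 1)) none
          = brpRepr directory (PySem.Str.len r) := by
        simp [brpRepr, PySem.Str.len_eq]
      simp only [List.foldl_cons, brpBestLen, h, if_true]
      rw [hrepr]
      exact ih (PySem.Str.len r)
    · simp only [Bool.not_eq_true] at h
      simp only [List.foldl_cons, brpBestLen, h, Bool.false_eq_true, if_false]
      exact ih m

theorem brpBestLen_mono (directory : String) (roots : List String) : ∀ (m : Int),
    m ≤ brpBestLen directory roots m := by
  induction roots with
  | nil => intro m; simp [brpBestLen]
  | cons r rs ih =>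
    intro m
    simp only [brpBestLen, List.foldl_cons]
    split_ifs with h
    · simp only [Bool.and_eq_true, decide_eq_true_eq] at h
      exact le_trans (le_of_lt h.2) (ih (PySem.Str.len r))
    · exact ih m

theorem brpBestLen_cases (directory : String) (roots : List String) : ∀ (m : Int),
    brpBestLen directory roots m = m ∨
    ∃ r ∈ roots, PySem.Str.startswith directory r = true ∧
      brpBestLen directory roots m = PySem.Str.len r := by
  induction roots with
  | nil => intro m; left; simp [brpBestLen]
  | cons r rs ih =>
    intro m
    simp only [brpBestLen, List.foldl_cons]
    split_ifs with h
    · simp only [Bool.and_eq_true, decide_eq_true_eq] at h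
      rcases ih (PySem.Str.len r) with h1 | ⟨r', hr', hsw, heq⟩
      · right; exact ⟨r, List.mem_cons_self, h.1, h1⟩
      · right; exact ⟨r', List.mem_cons_of_mem _ hr', hsw, heq⟩
    · rcases ih m with h1 | ⟨r', hr', hsw, heq⟩
      · left; exact h1
      · right; exact ⟨r', List.mem_cons_of_mem _ hr', hsw, heq⟩

theorem brpBestLen_ub (directory : String) (roots : List String) : ∀ (m : Int) (r : String),
    r ∈ roots → PySem.Str.startswith directory r = true →
    PySem.Str.len r ≤ brpBestLen directory roots m := by
  induction roots with
  | nil => intro m r hr; exact absurd hr (List.not_mem_nil)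
  | cons x rs ih =>
    intro m r hr hsw
    rcases List.mem_cons.mp hr with rfl | hr'
    · simp only [brpBestLen, List.foldl_cons]
      split_ifs with h
      · exact brpBestLen_mono directory rs (PySem.Str.len r)
      · simp only [Bool.and_eq_true, decide_eq_true_eq, not_and, not_lt] at h
        exact le_trans (h hsw) (brpBestLen_mono directory rs m)
    · simp only [brpBestLen, List.foldl_cons]
      split_ifs <;> exact ih _ r hr' hsw

-- membership of directory[:L] in the root set ↔ some root is a prefix of length L
theorem brpHit_iff (directory : String) (roots : List String) (L : Int)
    (h0 : 0 ≤ L) (hn : L ≤ PySem.Str.len directory) :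
    (PySem.Set.contains (PySem.Set.ofList roots) (PySem.Str.slice directory none (some L)) = true)
    ↔ ∃ r ∈ roots, PySem.Str.startswith directory r = true ∧ PySem.Str.len r = L := by
  rw [show (PySem.Set.contains (PySem.Set.ofList roots) (PySem.Str.slice directory none (some L)) = true)
      ↔ (PySem.Str.slice directory none (some L)) ∈ roots by simp [pysem]]
  have hsl : (PySem.Str.slice directory none (some L)).toList = directory.toList.take L.toNat := by
    rw [PySem.Str.toList_slice, PySem.Chars.slice_eq_listSlice, PySem.List.slice_to _ h0]
  have hLn : L.toNat ≤ directory.toList.length := by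
    rw [PySem.Str.len_eq] at hn; omega
  constructor
  · intro hmem
    refine ⟨PySem.Str.slice directory none (some L), hmem, ?_, ?_⟩
    · rw [show PySem.Str.startswith directory (PySem.Str.slice directory none (some L))
          = PySem.Chars.startswith directory.toList (PySem.Str.slice directory none (some L)).toList from rfl]
      rw [PySem.Chars.startswith_iff, hsl]
      exact List.take_prefix _ _
    · rw [PySem.Str.len_eq, hsl, List.length_take]
      omega
  · rintro ⟨r, hr, hsw, hlen⟩
    have hpre : r.toList <+: directory.toList := by
      rw [show PySem.Str.startswith directory r
          = PySem.Chars.startswith directory.toList r.toList from rfl] at hsw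
      exact (PySem.Chars.startswith_iff _ _).mp hsw
    have hrl : r.toList.length = L.toNat := by
      rw [PySem.Str.len_eq] at hlen; omega
    have : PySem.Str.slice directory none (some L) = r := by
      apply String.toList_inj.mp
      rw [hsl, ← hrl, ← List.prefix_iff_eq_take.mp hpre]
    rw [this]; exact hr

-- B's countdown scan returns brpRepr of the best length
theorem brpFindSuffix_eq (directory : String) (roots : List String)
    (M : Int) (hM1 : -1 ≤ M)
    (hMhit : 0 ≤ M → M ≤ PySem.Str.len directory ∧
      ∃ r ∈ roots, PySem.Str.startswith directory r = true ∧ PySem.Str.len r = M)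
    (hMub : ∀ r ∈ roots, PySem.Str.startswith directory r = true → PySem.Str.len r ≤ M) :
    ∀ (j : Nat) (a : Int), a = (j : Int) - 1 → a ≤ PySem.Str.len directory → M ≤ a →
    brpFindSuffix directory (PySem.Set.ofList roots) (PySem.List.pyRange a (-1) (-1))
      = brpRepr directory M := by
  intro j
  induction j with
  | zero =>
    intro a ha _ hMa
    have : M = -1 := by omega
    rw [PySem.List.pyRange_neg_one_eq_nil (by omega), brpFindSuffix, this,
      brpRepr_neg directory (-1) (by norm_num)]
  | succ k ih =>
    intro a ha hale hMa
    have ha0 : (0 : Int) ≤ a := by omega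
    rw [PySem.List.pyRange_neg_one_cons (by omega), brpFindSuffix]
    by_cases hhit : PySem.Set.contains (PySem.Set.ofList roots)
        (PySem.Str.slice directory none (some a)) = true
    · have haM : a ≤ M := by
        rcases (brpHit_iff directory roots a ha0 hale).mp hhit with ⟨r, hr, hsw, hlen⟩
        rw [← hlen]; exact hMub r hr hsw
      have : M = a := le_antisymm hMa haM
      simp only [hhit, if_true, this, brpRepr, if_pos ha0]
    · have hMne : M ≠ a := by
        intro heq
        rcases hMhit (by omega) with ⟨_, r, hr, hsw, hlen⟩
        exact hhit ((brpHit_iff directory roots a ha0 hale).mpr ⟨r, hr, hsw, heq ▸ hlen⟩)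
      simp only [Bool.not_eq_true] at hhit
      simp only [hhit, Bool.false_eq_true, if_false]
      exact ih (a - 1) (by omega) (by omega) (by omega)

-- the per-directory values of the two ports agree
theorem brpInner_eq (roots : List String) (directory : String) :
    (roots.foldl (fun (st : Int × String) root =>
      let root_len : Int := PySem.Str.len root
      if PySem.Str.startswith directory root && decide (root_len > st.1) then
        (root_len, PySem.Str.slice directory (some (root_len + 1)) none)
      else st) (-1, "")).2
    = brpFindSuffix directory (PySem.Set.ofList roots)
        (PySem.List.pyRange (PySem.Str.len directory) (-1) (-1)) := by
  have h0 : ("" : String) = brpRepr directory (-1) := by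
    rw [brpRepr_neg directory (-1) (by norm_num)]
  rw [h0, brpFoldA directory roots (-1)]
  set M := brpBestLen directory roots (-1) with hMdef
  have hM1 : -1 ≤ M := brpBestLen_mono directory roots (-1)
  have hMhit : 0 ≤ M → M ≤ PySem.Str.len directory ∧
      ∃ r ∈ roots, PySem.Str.startswith directory r = true ∧ PySem.Str.len r = M := by
    intro hM0
    rcases brpBestLen_cases directory roots (-1) with h | ⟨r, hr, hsw, heq⟩
    · omega
    · refine ⟨?_, r, hr, hsw, heq.symm⟩
      have hpre : r.toList <+: directory.toList := by
        rw [show PySem.Str.startswith directory r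
            = PySem.Chars.startswith directory.toList r.toList from rfl] at hsw
        exact (PySem.Chars.startswith_iff _ _).mp hsw
      have := List.IsPrefix.length_le hpre
      rw [hMdef, heq, PySem.Str.len_eq, PySem.Str.len_eq]
      omega
  have hMub : ∀ r ∈ roots, PySem.Str.startswith directory r = true → PySem.Str.len r ≤ M :=
    fun r hr hsw => brpBestLen_ub directory roots (-1) r hr hsw
  have hn : (0 : Int) ≤ PySem.Str.len directory := by rw [PySem.Str.len_eq]; positivity
  have hMa : M ≤ PySem.Str.len directory := by
    rcases le_or_gt 0 M with h | h
    · exact (hMhit h).1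
    · omega
  exact (brpFindSuffix_eq directory roots M hM1 hMhit hMub
    ((PySem.Str.len directory).toNat + 1) (PySem.Str.len directory) (by omega) le_rfl hMa).symm

-- ===== VERDICT (by name: the statement is the Claim_ definition above) =====
theorem build_relative_paths_py_spec : Claim_equal_build_relative_paths_py := by
  intro resource_roots resource_dirs _
  show build_relative_paths_py resource_roots resource_dirs
      = build_relative_paths_py_alt resource_roots resource_dirs
  unfold build_relative_paths_py build_relative_paths_py_alt
  congr 1
  apply List.foldl_ext
  intro ret directory _
  exact congrArg (ret.insert directory) (brpInner_eq resource_roots directory)
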